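-- pv_equiv track=rewrite | github.com/mskz1/set | src/text_calc.py | strip_square_brackets
-- ===== SOURCE A (Python) =====
-- def strip_square_brackets(src: str) -> str:
--     """
--     src文字列から、角括弧で囲まれた部分を削除した文字列を返す
--     """
--     idx_list = get_square_brackets_index(src)
--
--     res = ''
--     s_idx = 0
--     for idx in idx_list:
--         e_idx = idx[0]
--         res += src[s_idx:e_idx]
--         s_idx = idx[1] + 1
--     res += src[s_idx:]
--
--     return res
--
-- def get_square_brackets_index(src: str) -> list:
--     """
--     補助関数　角括弧の位置をタプルのリストで返す
--     """
--
--     def zenkaku_to_hankaku():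
--         return src.replace('［', '[').replace('］', ']')
--
--     def check_brackets_counts(src):
--         num_of_open_brackets = src.count('[')
--         num_of_close_brackets = src.count(']')
--         if num_of_open_brackets != num_of_close_brackets:
--             raise ValueError('Square brackets are not balanced')
--
--     src2 = zenkaku_to_hankaku()
--     check_brackets_counts(src2)
--
--     index_of_open_brackets = []
--     index_of_close_brackets = []
--     for i, c in enumerate(src2):
--         if c == '[':
--             index_of_open_brackets.append(i)
--         elif c == ']':
--             index_of_close_brackets.append(i)
--     res = list(zip(index_of_open_brackets, index_of_close_brackets))
--
--     prev_close_pos = 0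
--     for pos in res:
--         if pos[0] > pos[1] or prev_close_pos > pos[0]:
--             raise ValueError('Nested brackets')
--         prev_close_pos = pos[1]
--
--     return res
-- ===== SOURCE B (Python) =====
-- def strip_square_brackets(src: str) -> str:
--     """
--     src文字列から、角括弧で囲まれた部分を削除した文字列を返す
--     """
--     src2 = src.replace('［', '[').replace('］', ']')
--     if src2.count('[') != src2.count(']'):
--         raise ValueError('Square brackets are not balanced')
--     out = []
--     inside = False
--     for c in src2:
--         if c == '[':
--             if inside:
--                 raise ValueError('Nested brackets')
--             inside = True
--         elif c == ']':
--             if not inside: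
--                 raise ValueError('Nested brackets')
--             inside = False
--         elif not inside:
--             out.append(c)
--     return ''.join(out)
-- ===== Notes on version B (the rewrite author's own statement) =====
-- stated objective: simpler
-- what changed: Replaced the two-pass design (collect all bracket indices, zip-validate the pairs, then re-slice the source between the recorded positions) by a single left-to-right scan over the normalized string carrying an inside-brackets flag that drops bracketed characters as it goes.
import Mathlib
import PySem

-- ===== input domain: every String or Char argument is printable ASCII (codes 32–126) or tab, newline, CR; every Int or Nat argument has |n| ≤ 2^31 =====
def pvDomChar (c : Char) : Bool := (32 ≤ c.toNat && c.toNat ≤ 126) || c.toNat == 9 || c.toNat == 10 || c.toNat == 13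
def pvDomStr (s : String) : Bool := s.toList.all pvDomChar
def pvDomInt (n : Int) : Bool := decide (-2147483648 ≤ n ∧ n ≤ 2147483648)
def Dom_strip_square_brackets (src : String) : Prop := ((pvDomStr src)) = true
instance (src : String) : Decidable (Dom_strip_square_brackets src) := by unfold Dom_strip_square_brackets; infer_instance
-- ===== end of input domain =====

-- B replaces A's collect-indices / zip-validate / re-slice design by a single scan with an
-- inside-brackets flag (objective: simpler); A = B wherever A returns (Pre_ excludes A's ValueErrors).


-- ===== PORT A =====
-- zenkaku_to_hankaku: src.replace('［','[').replace('］',']')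
def sbNorm (src : String) : String :=
  PySem.Str.replace (PySem.Str.replace src "［" "[") "］" "]"

-- the enumerate loop appending each '[' index / ']' index to its list (same traversal, built by cons)
def sbCollect : List Char → Nat → List Nat × List Nat
  | [], _ => ([], [])
  | c :: t, i =>
    let p := sbCollect t (i + 1)
    if c = '[' then (i :: p.1, p.2)
    else if c = ']' then (p.1, i :: p.2) else p

-- the validation loop over the zipped pairs with prev_close_pos (false = raise ValueError('Nested brackets'))
def sbCheck : List (Nat × Nat) → Nat → Bool
  | [], _ => true
  | (o, c) :: r, prev => if o > c ∨ prev > o then false else sbCheck r c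

-- the slicing loop: res += src[s_idx:e_idx] per pair, then res += src[s_idx:]
def sbSlices (l : List Char) : List (Nat × Nat) → Nat → List Char
  | [], s => PySem.List.slice l (some (s : Int)) none
  | (o, c) :: r, s => PySem.List.slice l (some (s : Int)) (some (o : Int)) ++ sbSlices l r (c + 1)

def strip_square_brackets (src : String) : String :=
  if PySem.Chars.count (sbNorm src).toList ['['] ≠ PySem.Chars.count (sbNorm src).toList [']'] then
    ""  -- ValueError('Square brackets are not balanced')
  else if sbCheck ((sbCollect (sbNorm src).toList 0).1.zip (sbCollect (sbNorm src).toList 0).2) 0 then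
    String.ofList (sbSlices src.toList ((sbCollect (sbNorm src).toList 0).1.zip (sbCollect (sbNorm src).toList 0).2) 0)
  else ""  -- ValueError('Nested brackets')

-- ===== PORT B ===== (B's zenkaku_to_hankaku line is identical to A's, so it shares sbNorm)
-- the one-pass flag scan; none = ValueError('Nested brackets')
def sbScan : List Char → Bool → Option (List Char)
  | [], _ => some []
  | c :: t, inside =>
    if c = '[' then (if inside then none else sbScan t true)
    else if c = ']' then (if inside then sbScan t false else none)
    else match sbScan t inside with
      | none => none
      | some out => some (if inside then out else c :: out)

def strip_square_brackets_alt (src : String) : String :=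
  if PySem.Chars.count (sbNorm src).toList ['['] ≠ PySem.Chars.count (sbNorm src).toList [']'] then
    ""  -- ValueError('Square brackets are not balanced')
  else
    match sbScan (sbNorm src).toList false with
    | none => ""  -- ValueError('Nested brackets')
    | some out => String.ofList out

-- ===== PRECONDITION & SPEC =====
-- Pre_ excludes exactly the inputs on which A raises ValueError; both A and B first normalize
-- fullwidth ［］ to [], so the conditions are stated on that normalized string: unbalanced bracket
-- counts, or a prefix in which brackets nest or close before opening (depth outside {0,1}).
def Pre_strip_square_brackets (src : String) : Prop :=
  (sbNorm src).toList.count '[' = (sbNorm src).toList.count ']' ∧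
  ∀ n ≤ (sbNorm src).toList.length,
    ((sbNorm src).toList.take n).count ']' ≤ ((sbNorm src).toList.take n).count '[' ∧
    ((sbNorm src).toList.take n).count '[' ≤ ((sbNorm src).toList.take n).count ']' + 1
instance (src : String) : Decidable (Pre_strip_square_brackets src) := by
  unfold Pre_strip_square_brackets; infer_instance
def pvWitness_strip_square_brackets : String := "a[b]c [d] e"

def Spec_strip_square_brackets (src : String) (out : String) : Prop := out = strip_square_brackets_alt src
instance (src : String) (out : String) : Decidable (Spec_strip_square_brackets src out) := by unfold Spec_strip_square_brackets; infer_instance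

-- ===== CLAIM (what is proved, stated in full; the proofs are below) =====
def Claim_equal_strip_square_brackets : Prop := ∀ (src : String), Dom_strip_square_brackets src → Pre_strip_square_brackets src → Spec_strip_square_brackets src (strip_square_brackets src)

-- ===== LEMMAS AND PROOFS =====

-- str.replace is the identity when the (single-char) needle does not occur
theorem sb_replace_go_id (ch : Char) (new : List Char) :
    ∀ (fuel : Nat) (l acc : List Char), ch ∉ l →
      PySem.Chars.replace.go [ch] new fuel l acc = acc.reverse ++ l := by
  intro fuel
  induction fuel with
  | zero => intro l acc _; simp [PySem.Chars.replace.go]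
  | succ n ih =>
    intro l acc h
    cases l with
    | nil => simp [PySem.Chars.replace.go]
    | cons c t =>
      have hne : ch ≠ c := by intro he; exact h (he ▸ List.mem_cons_self)
      have hpre : [ch].isPrefixOf (c :: t) = false := by
        simp [List.isPrefixOf]; exact hne
      rw [PySem.Chars.replace.go, if_neg (by simp [hpre])]
      rw [ih t (c :: acc) (fun hm => h (List.mem_cons_of_mem _ hm))]
      simp

theorem sb_replace_id (l : List Char) (ch : Char) (new : List Char) (h : ch ∉ l) :
    PySem.Chars.replace l [ch] new = l := by
  have hgo := sb_replace_go_id ch new l.length l [] h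
  simp [PySem.Chars.replace, hgo]

theorem sb_dom_not_mem (src : String) (h : Dom_strip_square_brackets src) (ch : Char)
    (hch : pvDomChar ch = false) : ch ∉ src.toList := by
  intro hm
  unfold Dom_strip_square_brackets pvDomStr at h
  have := List.all_eq_true.mp h ch hm
  rw [hch] at this; exact Bool.false_ne_true this

theorem sb_norm_toList (src : String) (h : Dom_strip_square_brackets src) :
    (sbNorm src).toList = src.toList := by
  unfold sbNorm
  rw [PySem.Str.toList_replace, PySem.Str.toList_replace]
  have h1 : ('［' : Char) ∉ src.toList := sb_dom_not_mem src h _ (by decide)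
  have h2 : ('］' : Char) ∉ src.toList := sb_dom_not_mem src h _ (by decide)
  have e1 : ("［" : String).toList = ['［'] := rfl
  have e2 : ("[" : String).toList = ['['] := rfl
  have e3 : ("］" : String).toList = ['］'] := rfl
  have e4 : ("]" : String).toList = [']'] := rfl
  rw [e1, e2, e3, e4, sb_replace_id _ _ _ h1, sb_replace_id _ _ _ h2]

-- str.count of a single-character needle is List.count
theorem sb_count_go (ch : Char) :
    ∀ (fuel : Nat) (l : List Char) (acc : Nat), l.length ≤ fuel →
      PySem.Chars.count.go [ch] fuel l acc = acc + l.count ch := by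
  intro fuel
  induction fuel with
  | zero =>
    intro l acc h
    have : l = [] := List.eq_nil_of_length_eq_zero (Nat.le_zero.mp h)
    subst this; simp [PySem.Chars.count.go]
  | succ n ih =>
    intro l acc h
    cases l with
    | nil => simp [PySem.Chars.count.go]
    | cons c t =>
      by_cases hc : ch = c
      · have hpre : [ch].isPrefixOf (c :: t) = true := by simp [List.isPrefixOf, hc]
        rw [PySem.Chars.count.go, if_pos (by simp [hpre])]
        simp only [List.length_cons] at h
        rw [show [ch].length = 1 from rfl]
        simp only [List.drop_succ_cons, List.drop_zero]
        rw [ih t (acc + 1) (by omega)]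
        subst hc; simp; omega
      · have hpre : [ch].isPrefixOf (c :: t) = false := by simp [List.isPrefixOf]; exact hc
        rw [PySem.Chars.count.go, if_neg (by simp [hpre])]
        simp only [List.length_cons] at h
        rw [ih t acc (by omega)]
        simp [Ne.symm hc]

theorem sb_count_singleton (l : List Char) (ch : Char) :
    PySem.Chars.count l [ch] = l.count ch := by
  have h := sb_count_go ch l.length l 0 (le_refl _)
  simp [PySem.Chars.count, h]

-- index shift for the collect loop
theorem sb_collect_add (l : List Char) :
    ∀ (i k : Nat), sbCollect l (i + k) =
      ((sbCollect l i).1.map (· + k), (sbCollect l i).2.map (· + k)) := by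
  induction l with
  | nil => intro i k; simp [sbCollect]
  | cons c t ih =>
    intro i k
    simp only [sbCollect]
    rw [show i + k + 1 = (i + 1) + k from by omega, ih (i + 1) k]
    by_cases h1 : c = '['
    · simp [h1]
    · by_cases h2 : c = ']' <;> simp [h1, h2]

-- a bracket-free prefix contributes nothing to the collect loop
theorem sb_collect_skip (m : List Char) (hm : ∀ c ∈ m, c ≠ '[' ∧ c ≠ ']') :
    ∀ (r : List Char) (i : Nat), sbCollect (m ++ r) i = sbCollect r (i + m.length) := by
  induction m with
  | nil => intro r i; simp
  | cons c t ih =>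
    intro r i
    have hc := hm c List.mem_cons_self
    simp only [List.cons_append, sbCollect, if_neg hc.1, if_neg hc.2]
    rw [ih (fun x hx => hm x (List.mem_cons_of_mem _ hx)) r (i + 1)]
    congr 1; simp; omega

def sbShift (k : Nat) (ps : List (Nat × Nat)) : List (Nat × Nat) :=
  ps.map (fun p => (p.1 + k, p.2 + k))

-- shift lemmas for the validation loop
theorem sb_check_shift (k : Nat) :
    ∀ (ps : List (Nat × Nat)) (p : Nat), sbCheck (sbShift k ps) (p + k) = sbCheck ps p := by
  intro ps
  induction ps with
  | nil => intro p; simp [sbShift, sbCheck]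
  | cons oc r ih =>
    intro p
    obtain ⟨o, c⟩ := oc
    simp only [sbShift, List.map_cons, sbCheck]
    have h1 : (o + k > c + k ∨ p + k > o + k) ↔ (o > c ∨ p > o) := by omega
    by_cases h : o > c ∨ p > o
    · rw [if_pos (h1.mpr h), if_pos h]
    · rw [if_neg (fun hh => h (h1.mp hh)), if_neg h]
      exact ih c

theorem sb_check_shift_le (k : Nat) (ps : List (Nat × Nat)) (p : Nat) (hp : p ≤ k) :
    sbCheck (sbShift k ps) p = sbCheck ps 0 := by
  cases ps with
  | nil => simp [sbShift, sbCheck]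
  | cons oc r =>
    obtain ⟨o, c⟩ := oc
    simp only [sbShift, List.map_cons, sbCheck]
    have h1 : (o + k > c + k ∨ p > o + k) ↔ (o > c ∨ 0 > o) := by omega
    by_cases h : o > c ∨ 0 > o
    · rw [if_pos (h1.mpr h), if_pos h]
    · rw [if_neg (fun hh => h (h1.mp hh)), if_neg h]
      exact sb_check_shift k r c

theorem sb_drop_append (pfx r : List Char) (s : Nat) :
    (pfx ++ r).drop (s + pfx.length) = r.drop s := by
  rw [List.drop_append, List.drop_eq_nil_of_le (by omega), List.nil_append]
  congr 1; omega

-- translation of the slicing loop across a dropped prefix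
theorem sb_slices_shift (pfx r : List Char) :
    ∀ (ps : List (Nat × Nat)) (s : Nat),
      sbSlices (pfx ++ r) (sbShift pfx.length ps) (s + pfx.length) = sbSlices r ps s := by
  intro ps
  induction ps with
  | nil =>
    intro s
    simp only [sbShift, List.map_nil, sbSlices]
    rw [PySem.List.slice_from_natCast, PySem.List.slice_from_natCast, sb_drop_append]
  | cons oc rest ih =>
    intro s
    obtain ⟨o, c⟩ := oc
    simp only [sbShift, List.map_cons, sbSlices]
    rw [PySem.List.slice_natCast, PySem.List.slice_natCast]
    congr 1
    · rw [sb_drop_append]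
      congr 1; omega
    · rw [show c + pfx.length + 1 = (c + 1) + pfx.length from by omega]
      exact ih (c + 1)

theorem sb_slices_pair (pfx r : List Char) (ps : List (Nat × Nat)) :
    sbSlices (pfx ++ r) (sbShift pfx.length ps) pfx.length = sbSlices r ps 0 := by
  have h := sb_slices_shift pfx r ps 0
  simpa using h

theorem sb_slices_cons_plain (c : Char) (t : List Char) (ps : List (Nat × Nat)) :
    sbSlices (c :: t) (sbShift 1 ps) 0 = c :: sbSlices t ps 0 := by
  cases ps with
  | nil =>
    simp only [sbShift, List.map_nil, sbSlices]
    rw [PySem.List.slice_from_natCast, PySem.List.slice_from_natCast]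
    simp
  | cons oc rest =>
    obtain ⟨o, cl⟩ := oc
    simp only [sbShift, List.map_cons, sbSlices]
    rw [PySem.List.slice_natCast, PySem.List.slice_natCast]
    rw [show (c :: t) = [c] ++ t from rfl]
    rw [show cl + 1 + 1 = (cl + 1) + ([c] : List Char).length from by simp]
    rw [show (List.map (fun p => (p.1 + 1, p.2 + 1)) rest) = sbShift ([c] : List Char).length rest from by simp [sbShift]]
    rw [sb_slices_shift [c] t rest (cl + 1)]
    simp [List.take_succ_cons]

-- the B-side scan skips a bracket-free run while inside brackets
theorem sb_scan_skip (m : List Char) (hm : ∀ c ∈ m, c ≠ '[' ∧ c ≠ ']') (r : List Char) :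
    sbScan (m ++ r) true = sbScan r true := by
  induction m with
  | nil => simp
  | cons c t ih =>
    have hc := hm c List.mem_cons_self
    simp only [List.cons_append, sbScan, if_neg hc.1, if_neg hc.2]
    rw [ih (fun x hx => hm x (List.mem_cons_of_mem _ hx))]
    cases sbScan r true <;> simp

-- the shape of strings A accepts: runs of plain characters and flat (non-nested) bracket pairs
inductive SbFlat : List Char → Prop
  | nil : SbFlat []
  | plain {c : Char} {t : List Char} : c ≠ '[' → c ≠ ']' → SbFlat t → SbFlat (c :: t)
  | pair {m t : List Char} : (∀ c ∈ m, c ≠ '[' ∧ c ≠ ']') → SbFlat t → SbFlat ('[' :: m ++ ']' :: t)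

theorem sb_first_mem_split {α : Type} [DecidableEq α] (a : α) :
    ∀ (l : List α), a ∈ l → ∃ s t, l = s ++ a :: t ∧ a ∉ s := by
  intro l
  induction l with
  | nil => intro h; exact absurd h (List.not_mem_nil)
  | cons c t ih =>
    intro h
    by_cases hc : c = a
    · exact ⟨[], t, by simp [hc], List.not_mem_nil⟩
    · obtain ⟨s, t', ht, hns⟩ := ih (by
        rcases List.mem_cons.mp h with h1 | h1
        · exact absurd h1.symm hc
        · exact h1)
      exact ⟨c :: s, t', by simp [ht], by
        intro hmem
        rcases List.mem_cons.mp hmem with h1 | h1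
        · exact hc h1.symm
        · exact hns h1⟩

-- the balance/prefix conditions of Pre_ yield the SbFlat shape
theorem sb_bal_flat :
    ∀ (N : Nat) (l : List Char), l.length ≤ N →
      l.count '[' = l.count ']' →
      (∀ n : Nat, (l.take n).count ']' ≤ (l.take n).count '[' ∧
                  (l.take n).count '[' ≤ (l.take n).count ']' + 1) →
      SbFlat l := by
  intro N
  induction N with
  | zero =>
    intro l hl _ _
    have : l = [] := List.eq_nil_of_length_eq_zero (Nat.le_zero.mp hl)
    subst this; exact SbFlat.nil
  | succ N ih =>
    intro l hl hc hp
    cases l with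
    | nil => exact SbFlat.nil
    | cons c t =>
      by_cases hcb : c = ']'
      · exfalso
        have h1 := (hp 1).1
        subst hcb
        simp at h1
      by_cases hob : c = '['
      · subst hob
        have hct : 1 ≤ t.count ']' := by
          simp at hc; omega
        have hmem : ']' ∈ t := List.count_pos_iff.mp (by omega)
        obtain ⟨m, t', ht, hnm⟩ := sb_first_mem_split ']' t hmem
        subst ht
        have hmo : '[' ∉ m := by
          intro hmem2
          obtain ⟨m1, m2, hm, hnm1⟩ := sb_first_mem_split '[' m hmem2
          have hnm1' : (']' : Char) ∉ m1 := by
            intro hx; exact hnm (hm ▸ List.mem_append_left _ hx)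
          have h2 := (hp (m1.length + 2)).2
          rw [hm] at h2
          have htake : ('[' :: ((m1 ++ '[' :: m2) ++ ']' :: t')).take (m1.length + 2)
              = '[' :: (m1 ++ ['[']) := by
            rw [show m1.length + 2 = (m1.length + 1) + 1 from by omega, List.take_succ_cons,
                List.append_assoc, List.take_append]
            simp
          rw [htake] at h2
          simp [List.count_append, List.count_eq_zero.mpr hnm1', List.count_eq_zero.mpr hnm1] at h2
        have hmfree : ∀ x ∈ m, x ≠ '[' ∧ x ≠ ']' := by
          intro x hx
          exact ⟨fun he => hmo (he ▸ hx), fun he => hnm (he ▸ hx)⟩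
        have hcm1 : m.count '[' = 0 := List.count_eq_zero.mpr hmo
        have hcm2 : m.count ']' = 0 := List.count_eq_zero.mpr hnm
        have hct' : t'.count '[' = t'.count ']' := by
          simp [List.count_append, hcm1, hcm2] at hc
          omega
        have hpt' : ∀ n : Nat, (t'.take n).count ']' ≤ (t'.take n).count '[' ∧
            (t'.take n).count '[' ≤ (t'.take n).count ']' + 1 := by
          intro n
          have h3 := hp (m.length + 2 + n)
          have htake : ('[' :: (m ++ ']' :: t')).take (m.length + 2 + n)
              = '[' :: (m ++ ']' :: t'.take n) := by
            rw [show m.length + 2 + n = (m.length + 1 + n) + 1 from by omega, List.take_succ_cons]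
            rw [show m ++ ']' :: t' = (m ++ [']']) ++ t' from by simp]
            rw [List.take_append, List.take_of_length_le (by simp)]
            simp
          rw [htake] at h3
          simp [List.count_append, hcm1, hcm2] at h3
          omega
        have hlt' : t'.length ≤ N := by
          simp at hl; omega
        exact SbFlat.pair hmfree (ih t' hlt' hct' hpt')
      · have hct : t.count '[' = t.count ']' := by
          simp [hob, hcb] at hc
          simpa using hc
        have hpt : ∀ n : Nat, (t.take n).count ']' ≤ (t.take n).count '[' ∧
            (t.take n).count '[' ≤ (t.take n).count ']' + 1 := by
          intro n
          have h4 := hp (n + 1)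
          rw [List.take_succ_cons] at h4
          simp [hob, hcb] at h4
          simpa using h4
        have hlt : t.length ≤ N := by simp at hl; omega
        exact SbFlat.plain hob hcb (ih t hlt hct hpt)

-- the main simulation: on SbFlat input A's validation passes and B's scan returns exactly A's slicing result
theorem sb_main (l : List Char) (h : SbFlat l) :
    sbCheck ((sbCollect l 0).1.zip (sbCollect l 0).2) 0 = true ∧
    sbScan l false = some (sbSlices l ((sbCollect l 0).1.zip (sbCollect l 0).2) 0) := by
  induction h with
  | nil => simp [sbCollect, sbCheck, sbScan, sbSlices]
  | @plain c t hco hcc _ ih =>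
    have hcol : sbCollect (c :: t) 0 =
        ((sbCollect t 0).1.map (· + 1), (sbCollect t 0).2.map (· + 1)) := by
      simp only [sbCollect, if_neg hco, if_neg hcc]
      exact sb_collect_add t 0 1
    have hzip : (sbCollect (c :: t) 0).1.zip (sbCollect (c :: t) 0).2
        = sbShift 1 ((sbCollect t 0).1.zip (sbCollect t 0).2) := by
      rw [hcol]; simp [sbShift, List.zip_map]
    constructor
    · rw [hzip, sb_check_shift_le 1 _ 0 (by omega)]; exact ih.1
    · rw [hzip, sb_slices_cons_plain]
      simp only [sbScan, if_neg hco, if_neg hcc, ih.2]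
      rfl
  | @pair m t hm _ ih =>
    have hcol : sbCollect ('[' :: m ++ ']' :: t) 0 =
        (0 :: (sbCollect t 0).1.map (· + (m.length + 2)),
         (m.length + 1) :: (sbCollect t 0).2.map (· + (m.length + 2))) := by
      show sbCollect ('[' :: (m ++ ']' :: t)) 0 = _
      simp only [sbCollect]
      rw [sb_collect_skip m hm (']' :: t) 1]
      simp only [sbCollect, if_neg (by decide : (']' : Char) ≠ '[')]
      rw [show 1 + m.length + 1 = 0 + (m.length + 2) from by omega, sb_collect_add t 0 (m.length + 2)]
      simp; omega
    have hzip : (sbCollect ('[' :: m ++ ']' :: t) 0).1.zip (sbCollect ('[' :: m ++ ']' :: t) 0).2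
        = (0, m.length + 1) :: sbShift (m.length + 2) ((sbCollect t 0).1.zip (sbCollect t 0).2) := by
      rw [hcol]; simp [sbShift, List.zip_map]
    have hsplit : ('[' :: m ++ ']' :: t) = ('[' :: m ++ [']']) ++ t := by simp
    have hslice : sbSlices ('[' :: m ++ ']' :: t)
        ((0, m.length + 1) :: sbShift (m.length + 2) ((sbCollect t 0).1.zip (sbCollect t 0).2)) 0
        = sbSlices t ((sbCollect t 0).1.zip (sbCollect t 0).2) 0 := by
      simp only [sbSlices]
      rw [PySem.List.slice_natCast, hsplit]
      rw [show m.length + 1 + 1 = ('[' :: m ++ [']']).length from by simp]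
      rw [sb_slices_pair]
      simp
    constructor
    · rw [hzip]
      simp only [sbCheck]
      rw [if_neg (by omega), sb_check_shift_le (m.length + 2) _ (m.length + 1) (by omega)]
      exact ih.1
    · rw [hzip, hslice]
      show sbScan ('[' :: (m ++ ']' :: t)) false = _
      rw [show sbScan ('[' :: (m ++ ']' :: t)) false = sbScan (m ++ ']' :: t) true from rfl]
      rw [sb_scan_skip m hm]
      rw [show sbScan (']' :: t) true = sbScan t false from rfl]
      exact ih.2

-- ===== VERDICT (by name: the statement is the Claim_ definition above) =====
theorem strip_square_brackets_spec : Claim_equal_strip_square_brackets := by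
  intro src hdom hpre
  unfold Spec_strip_square_brackets strip_square_brackets strip_square_brackets_alt
  have hn : (sbNorm src).toList = src.toList := sb_norm_toList src hdom
  unfold Pre_strip_square_brackets at hpre
  rw [hn] at hpre
  obtain ⟨hc, hp⟩ := hpre
  have hp' : ∀ n : Nat, (src.toList.take n).count ']' ≤ (src.toList.take n).count '[' ∧
      (src.toList.take n).count '[' ≤ (src.toList.take n).count ']' + 1 := by
    intro n
    by_cases hn' : n ≤ src.toList.length
    · exact hp n hn'
    · rw [List.take_of_length_le (by omega)]
      constructor <;> omega
  have hflat : SbFlat src.toList := sb_bal_flat src.toList.length src.toList (le_refl _) hc hp'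
  have hmain := sb_main src.toList hflat
  rw [hn, sb_count_singleton, sb_count_singleton]
  have hcond : ¬ (List.count '[' src.toList ≠ List.count ']' src.toList) := by simp [hc]
  rw [if_neg hcond, if_neg hcond, if_pos hmain.1, hmain.2]
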